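-- pv_equiv track=rewrite | github.com/leohafsa/Custom_Ai_chatbot_Mdiagnosis | all_versions/medicine_remedies - Copy.py | find_sentences_with_word
-- ===== SOURCE A (Python) =====
-- def find_sentences_with_word(sentences, target_word,stop_word):
--     result_list = []
--     check = False
--     for sentence in sentences:
--         lower_sentence = sentence.lower()  # Convert to lowercase
--
--         if target_word[0] in lower_sentence or target_word[1] in lower_sentence:
--             check = True
--         if stop_word!=None:
--           if stop_word[0] in lower_sentence or stop_word[1] in lower_sentence:
--             break
--         if check:
--             result_list.append(sentence)
--
--
--     return result_list
-- ===== SOURCE B (Python) =====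
-- def find_sentences_with_word(sentences, target_word, stop_word):
--     lowers = [s.lower() for s in sentences]
--     n = len(sentences)
--     start = n
--     for i, ls in enumerate(lowers):
--         if target_word[0] in ls or target_word[1] in ls:
--             start = i
--             break
--     stop = n
--     if stop_word is not None:
--         for i, ls in enumerate(lowers):
--             if stop_word[0] in ls or stop_word[1] in ls:
--                 stop = i
--                 break
--     return list(sentences[start:stop])
-- ===== Notes on version B (the rewrite author's own statement) =====
-- stated objective: simpler
-- what changed: Instead of a single stateful loop with a 'check' flag, an accumulator and a break, B computes two boundary indices (first sentence matching the target, first sentence matching the stop word) and returns the slice sentences[start:stop].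
-- outside the precondition, e.g. on find_sentences_with_word(['aa', 'ba', 'cc'], ['a'], ['b', 'b']): A returns ['aa'], B returns ['aa']
import Mathlib
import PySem

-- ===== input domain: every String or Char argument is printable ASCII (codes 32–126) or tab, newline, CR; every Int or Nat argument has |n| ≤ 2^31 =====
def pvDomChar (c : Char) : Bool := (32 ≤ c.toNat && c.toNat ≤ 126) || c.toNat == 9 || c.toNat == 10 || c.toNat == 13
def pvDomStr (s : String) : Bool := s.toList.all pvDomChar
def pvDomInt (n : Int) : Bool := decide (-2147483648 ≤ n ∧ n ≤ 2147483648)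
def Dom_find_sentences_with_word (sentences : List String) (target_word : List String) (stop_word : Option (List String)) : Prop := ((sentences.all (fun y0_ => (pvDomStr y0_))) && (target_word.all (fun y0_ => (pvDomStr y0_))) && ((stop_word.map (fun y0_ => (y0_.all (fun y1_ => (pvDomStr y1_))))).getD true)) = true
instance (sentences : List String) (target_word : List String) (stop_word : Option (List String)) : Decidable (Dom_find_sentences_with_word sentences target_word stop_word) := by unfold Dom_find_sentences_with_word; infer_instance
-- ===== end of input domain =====

-- B replaces A's stateful flag/accumulator/break loop by two boundary-index scans and a slice;
-- objective: simpler. (Pure function, no mutation of the arguments.)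

-- ===== PORT A =====
-- 'w[0] in ls or w[1] in ls'; under Pre_ both indices are in range, so pyGetD is exact there.
def pvMatch2 (w : List String) (ls : String) : Bool :=
  PySem.Str.isIn (PySem.List.pyGetD w 0 "") ls || PySem.Str.isIn (PySem.List.pyGetD w 1 "") ls

-- A's for-loop: state = (check, result_list); 'break' = return the accumulator.
def pvLoopA (tw : List String) (sw : Option (List String)) :
    List String → Bool → List String → List String
  | [], _, acc => acc
  | s :: rest, check, acc =>
    let ls := PySem.Str.lower s
    let check' := if pvMatch2 tw ls then true else check
    if (match sw with | some w => pvMatch2 w ls | none => false) then acc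
    else pvLoopA tw sw rest check' (if check' then acc ++ [s] else acc)

def find_sentences_with_word (sentences : List String) (target_word : List String) (stop_word : Option (List String)) : List String :=
  pvLoopA target_word stop_word sentences false []

-- ===== PORT B =====
-- 'start = n; for i, ls in enumerate(lowers): if match: start = i; break' — first matching index, else length.
def pvScanIdx (w : List String) : List String → Nat
  | [] => 0
  | ls :: rest => if pvMatch2 w ls then 0 else 1 + pvScanIdx w rest

def find_sentences_with_word_alt (sentences : List String) (target_word : List String) (stop_word : Option (List String)) : List String :=
  let lowers := sentences.map PySem.Str.lower
  let start := pvScanIdx target_word lowers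
  let stop := match stop_word with
    | none => sentences.length
    | some w => pvScanIdx w lowers
  PySem.List.slice sentences (some (start : Int)) (some (stop : Int))

-- ===== PRECONDITION & SPEC =====
-- Pre_ excludes malformed target/stop tuples (fewer than 2 entries) on sentences where A's
-- short-circuit 'or' reaches the missing second entry and raises IndexError; a length-1 target
-- whose sole entry matches every sentence, or a length-1 stop word matching the first sentence
-- (immediate break), never reaches the missing index and stays inside.
def Pre_find_sentences_with_word (sentences : List String) (target_word : List String) (stop_word : Option (List String)) : Prop :=
  sentences = [] ∨
    ((2 ≤ target_word.length ∨ (target_word.length = 1 ∧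
        ∀ s ∈ sentences, PySem.Str.isIn (target_word.getD 0 "") (PySem.Str.lower s) = true)) ∧
     (∀ w, stop_word = some w → (2 ≤ w.length ∨ (w.length = 1 ∧
        ∀ s ∈ sentences.take 1, PySem.Str.isIn (w.getD 0 "") (PySem.Str.lower s) = true))))
instance (sentences : List String) (target_word : List String) (stop_word : Option (List String)) : Decidable (Pre_find_sentences_with_word sentences target_word stop_word) := by unfold Pre_find_sentences_with_word; infer_instance

def pvWitness_find_sentences_with_word : List String × List String × Option (List String) :=
  (["Hello there.", "Take GINGER tea.", "Rest well.", "The end."], ["ginger", "honey"], some (["end", "bye"]))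

def Spec_find_sentences_with_word (sentences : List String) (target_word : List String) (stop_word : Option (List String)) (out : List String) : Prop := out = find_sentences_with_word_alt sentences target_word stop_word
instance (sentences : List String) (target_word : List String) (stop_word : Option (List String)) (out : List String) : Decidable (Spec_find_sentences_with_word sentences target_word stop_word out) := by unfold Spec_find_sentences_with_word; infer_instance

-- ===== CLAIM (what is proved, stated in full; the proofs are below) =====
def Claim_equal_find_sentences_with_word : Prop := ∀ (sentences : List String) (target_word : List String) (stop_word : Option (List String)), Dom_find_sentences_with_word sentences target_word stop_word → Pre_find_sentences_with_word sentences target_word stop_word → Spec_find_sentences_with_word sentences target_word stop_word (find_sentences_with_word sentences target_word stop_word)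

-- ===== LEMMAS AND PROOFS =====

-- Once check = true, A keeps every sentence up to (excluding) the first stop match.
theorem pvLoopA_true (tw : List String) (sw : Option (List String)) (ss acc : List String) :
    pvLoopA tw sw ss true acc =
      acc ++ ss.take (match sw with
        | none => ss.length
        | some w => pvScanIdx w (ss.map PySem.Str.lower)) := by
  induction ss generalizing acc with
  | nil => cases sw <;> simp [pvLoopA]
  | cons s rest ih =>
    cases sw with
    | none => simp [pvLoopA, ih]
    | some w =>
      by_cases h : pvMatch2 w (PySem.Str.lower s) = true
      · simp [pvLoopA, pvScanIdx, h]
      · simp [pvLoopA, pvScanIdx, h, ih, Nat.add_comm 1, List.take_succ_cons]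

-- With check = false, A's result is the slice between the two boundary indices.
theorem pvLoopA_false (tw : List String) (sw : Option (List String)) (ss acc : List String) :
    pvLoopA tw sw ss false acc =
      acc ++ ((ss.drop (pvScanIdx tw (ss.map PySem.Str.lower))).take
        ((match sw with
          | none => ss.length
          | some w => pvScanIdx w (ss.map PySem.Str.lower)) - pvScanIdx tw (ss.map PySem.Str.lower))) := by
  induction ss generalizing acc with
  | nil => cases sw <;> simp [pvLoopA]
  | cons s rest ih =>
    by_cases ht : pvMatch2 tw (PySem.Str.lower s) = true
    · -- target matches head: start = 0
      cases sw with
      | none =>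
        simp [pvLoopA, pvScanIdx, ht, pvLoopA_true]
      | some w =>
        by_cases hs : pvMatch2 w (PySem.Str.lower s) = true
        · simp [pvLoopA, pvScanIdx, ht, hs]
        · simp [pvLoopA, pvScanIdx, ht, hs, pvLoopA_true, Nat.add_comm 1, List.take_succ_cons]
    · -- target does not match head: start = 1 + start'
      have ht' : pvMatch2 tw (PySem.Str.lower s) = false := by
        simpa using ht
      cases sw with
      | none =>
        simp [pvLoopA, pvScanIdx, ht', ih, Nat.add_comm 1, Nat.succ_sub_succ]
      | some w =>
        by_cases hs : pvMatch2 w (PySem.Str.lower s) = true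
        · simp [pvLoopA, pvScanIdx, ht', hs]
        · simp [pvLoopA, pvScanIdx, ht', hs, ih, Nat.add_comm 1, Nat.succ_sub_succ]

-- ===== VERDICT (by name: the statement is the Claim_ definition above) =====
theorem find_sentences_with_word_spec : Claim_equal_find_sentences_with_word := by
  intro sentences target_word stop_word _ _
  unfold Spec_find_sentences_with_word find_sentences_with_word find_sentences_with_word_alt
  rw [pvLoopA_false]
  cases stop_word <;>
    simp [PySem.List.slice_natCast]
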